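-- pv_equiv track=rewrite | github.com/TesterNick/Battleships | python/player.py | validate_ships_by_type
-- ===== SOURCE A (Python) =====
-- def validate_ships_by_type(ships):
--     one_deck = 0
--     two_deck = 0
--     three_deck = 0
--     four_deck = 0
--     for ship in ships:
--         if len(ship) == 0 or len(ship) > 4:
--             return False
--         elif len(ship) == 1:
--             one_deck += 1
--         elif len(ship) == 2:
--             two_deck += 1
--         elif len(ship) == 3:
--             three_deck += 1
--         elif len(ship) == 4:
--             four_deck += 1
--     return one_deck == 4 and two_deck == 3 and three_deck == 2 and four_deck == 1
-- ===== SOURCE B (Python) =====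
-- def validate_ships_by_type(ships):
--     return sorted(len(ship) for ship in ships) == [1, 1, 1, 1, 2, 2, 2, 3, 3, 4]
-- ===== Notes on version B (the rewrite author's own statement) =====
-- stated objective: idiomatic
-- what changed: Replaces A's four counter variables, the early-exit length check and the final conjunction by sorting the list of ship lengths once and comparing it to the one valid sorted fleet profile [1,1,1,1,2,2,2,3,3,4].
import Mathlib
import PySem

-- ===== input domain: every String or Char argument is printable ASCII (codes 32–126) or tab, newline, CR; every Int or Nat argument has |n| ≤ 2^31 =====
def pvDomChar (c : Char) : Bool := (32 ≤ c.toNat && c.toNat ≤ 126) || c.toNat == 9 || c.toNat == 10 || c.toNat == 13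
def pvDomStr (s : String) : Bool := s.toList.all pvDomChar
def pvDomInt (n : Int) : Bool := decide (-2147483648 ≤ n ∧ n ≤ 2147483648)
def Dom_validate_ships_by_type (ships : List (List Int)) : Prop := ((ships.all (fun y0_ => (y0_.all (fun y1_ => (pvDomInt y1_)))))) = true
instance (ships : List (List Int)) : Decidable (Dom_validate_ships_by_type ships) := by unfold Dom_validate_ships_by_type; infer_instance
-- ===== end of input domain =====

-- B sorts the ship lengths once and compares to the single valid sorted fleet profile,
-- instead of A's four counters with an early-exit scan (objective: idiomatic; same result everywhere).
-- ===== PORT A =====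
def vsbLoop (one_deck two_deck three_deck four_deck : Int) : List (List Int) → Bool
  | [] => one_deck == 4 && two_deck == 3 && three_deck == 2 && four_deck == 1
  | ship :: rest =>
    if ship.length = 0 ∨ ship.length > 4 then false
    else if ship.length = 1 then vsbLoop (one_deck + 1) two_deck three_deck four_deck rest
    else if ship.length = 2 then vsbLoop one_deck (two_deck + 1) three_deck four_deck rest
    else if ship.length = 3 then vsbLoop one_deck two_deck (three_deck + 1) four_deck rest
    else if ship.length = 4 then vsbLoop one_deck two_deck three_deck (four_deck + 1) rest
    else vsbLoop one_deck two_deck three_deck four_deck rest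

def validate_ships_by_type (ships : List (List Int)) : Bool :=
  vsbLoop 0 0 0 0 ships

-- ===== PORT B =====
def validate_ships_by_type_alt (ships : List (List Int)) : Bool :=
  PySem.List.sorted (ships.map (fun ship => (ship.length : Int))) (fun x => x) false
    == [1, 1, 1, 1, 2, 2, 2, 3, 3, 4]

-- ===== PRECONDITION & SPEC =====
def Spec_validate_ships_by_type (ships : List (List Int)) (out : Bool) : Prop := out = validate_ships_by_type_alt ships
instance (ships : List (List Int)) (out : Bool) : Decidable (Spec_validate_ships_by_type ships out) := by unfold Spec_validate_ships_by_type; infer_instance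

-- ===== CLAIM (what is proved, stated in full; the proofs are below) =====
def Claim_equal_validate_ships_by_type : Prop := ∀ (ships : List (List Int)), Dom_validate_ships_by_type ships → Spec_validate_ships_by_type ships (validate_ships_by_type ships)

-- ===== LEMMAS AND PROOFS =====

def fleetProfile : List Int := [1, 1, 1, 1, 2, 2, 2, 3, 3, 4]

theorem vsbLoop_char (ships : List (List Int)) :
    ∀ c1 c2 c3 c4 : Int,
    (vsbLoop c1 c2 c3 c4 ships = true ↔
      ((∀ a ∈ ships.map (fun s => (s.length : Int)), 1 ≤ a ∧ a ≤ 4) ∧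
        c1 + ((ships.map (fun s => (s.length : Int))).count 1 : Int) = 4 ∧
        c2 + ((ships.map (fun s => (s.length : Int))).count 2 : Int) = 3 ∧
        c3 + ((ships.map (fun s => (s.length : Int))).count 3 : Int) = 2 ∧
        c4 + ((ships.map (fun s => (s.length : Int))).count 4 : Int) = 1)) := by
  induction ships with
  | nil =>
    intro c1 c2 c3 c4
    simp [vsbLoop]
    tauto
  | cons s rest ih =>
    intro c1 c2 c3 c4
    rw [vsbLoop]
    by_cases h0 : s.length = 0 ∨ s.length > 4
    · rw [if_pos h0]
      simp only [List.map_cons, List.mem_cons, Bool.false_eq_true, false_iff]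
      rintro ⟨hall, -⟩
      have := hall _ (Or.inl rfl)
      omega
    · rw [if_neg h0]
      rcases (show s.length = 1 ∨ s.length = 2 ∨ s.length = 3 ∨ s.length = 4 by omega)
        with h | h | h | h <;>
      · simp only [h]
        norm_num
        rw [ih]
        simp only [List.count_cons]
        constructor
        · rintro ⟨hall, h1, h2, h3, h4⟩
          refine ⟨⟨⟨by omega, by omega⟩, fun a ha => ?_⟩, ?_, ?_, ?_, ?_⟩
          · have := hall _ (List.mem_map.mpr ⟨a, ha, rfl⟩)
            omega
          all_goals ((try simp only [h] at *); (try norm_num at *); omega)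
        · rintro ⟨hall, h1, h2, h3, h4⟩
          refine ⟨fun a ha => ?_, ?_, ?_, ?_, ?_⟩
          · obtain ⟨t, ht, rfl⟩ := List.mem_map.mp ha
            have := hall.2 t ht
            omega
          all_goals ((try simp only [h] at *); (try norm_num at *); omega)

theorem alt_iff_perm (ships : List (List Int)) :
    (validate_ships_by_type_alt ships = true ↔
      (ships.map (fun s => (s.length : Int))).Perm fleetProfile) := by
  unfold validate_ships_by_type_alt
  rw [beq_iff_eq]
  constructor
  · intro h
    exact (h ▸ PySem.List.sorted_perm _ _ _).symm
  · intro h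
    exact PySem.List.sorted_id_eq_of_perm_of_pairwise _ _ h.symm (by decide)

theorem perm_iff_char (ships : List (List Int)) :
    ((ships.map (fun s => (s.length : Int))).Perm fleetProfile ↔
      ((∀ a ∈ ships.map (fun s => (s.length : Int)), 1 ≤ a ∧ a ≤ 4) ∧
        (ships.map (fun s => (s.length : Int))).count 1 = 4 ∧
        (ships.map (fun s => (s.length : Int))).count 2 = 3 ∧
        (ships.map (fun s => (s.length : Int))).count 3 = 2 ∧
        (ships.map (fun s => (s.length : Int))).count 4 = 1)) := by
  set m := ships.map (fun s => (s.length : Int)) with hm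
  rw [List.perm_iff_count]
  constructor
  · intro h
    refine ⟨?_, ?_, ?_, ?_, ?_⟩
    · intro a ha
      by_contra hbad
      have hc : List.count a m = List.count a fleetProfile := h a
      have hzero : List.count a fleetProfile = 0 := by
        apply List.count_eq_zero.mpr
        intro hmemL
        simp [fleetProfile] at hmemL
        omega
      rw [hzero] at hc
      exact (List.count_eq_zero.mp hc) ha
    · have := h 1; simpa [fleetProfile] using this
    · have := h 2; simpa [fleetProfile] using this
    · have := h 3; simpa [fleetProfile] using this
    · have := h 4; simpa [fleetProfile] using this
  · rintro ⟨hall, h1, h2, h3, h4⟩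
    intro a
    by_cases ha : a = 1 ∨ a = 2 ∨ a = 3 ∨ a = 4
    · rcases ha with rfl | rfl | rfl | rfl <;>
        simp only [h1, h2, h3, h4] <;> simp [fleetProfile]
    · have hma : List.count a m = 0 := by
        apply List.count_eq_zero.mpr
        intro hmem
        have := hall a hmem
        omega
      have hLa : List.count a fleetProfile = 0 := by
        apply List.count_eq_zero.mpr
        intro hmem
        simp [fleetProfile] at hmem
        omega
      rw [hma, hLa]

-- ===== VERDICT (by name: the statement is the Claim_ definition above) =====
theorem validate_ships_by_type_spec : Claim_equal_validate_ships_by_type := by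
  intro ships _
  unfold Spec_validate_ships_by_type
  rw [Bool.eq_iff_iff]
  unfold validate_ships_by_type
  rw [vsbLoop_char ships 0 0 0 0, alt_iff_perm, perm_iff_char]
  constructor
  · rintro ⟨hall, h1, h2, h3, h4⟩
    exact ⟨hall, by omega, by omega, by omega, by omega⟩
  · rintro ⟨hall, h1, h2, h3, h4⟩
    exact ⟨hall, by omega, by omega, by omega, by omega⟩
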